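-- pv_equiv track=rewrite | github.com/vinivin153/problem-solving | Programmers/땅따먹기.py | solution
-- ===== SOURCE A (Python) =====
-- def solution(land):
--     dp = land[0]
--
--     for row in range(1, len(land)):
--         temp = [0] * 4
--         for col in range(4):
--             temp[col] = max(dp[:col] + dp[col + 1 :]) + land[row][col]
--
--         dp = temp
--
--     return max(dp)
-- ===== SOURCE B (Python) =====
-- def solution(land):
--     dp = land[0]
--     for row in land[1:]:
--         # one scan: largest value m1, its first index i1, second-largest m2
--         if dp[0] >= dp[1]:
--             m1, i1, m2 = dp[0], 0, dp[1]
--         else: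
--             m1, i1, m2 = dp[1], 1, dp[0]
--         j = 2
--         for v in dp[2:]:
--             if v > m1:
--                 m2, m1, i1 = m1, v, j
--             elif v > m2:
--                 m2 = v
--             j += 1
--         dp = [(m2 if c == i1 else m1) + row[c] for c in range(4)]
--     return max(dp)
-- ===== Notes on version B (the rewrite author's own statement) =====
-- stated objective: alternative
-- what changed: Per previous row, B computes the maximum, its first index and the second-largest value in a single scan and builds the next row from those three numbers, instead of A's per-column max over the row with that column sliced out.
import Mathlib
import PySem

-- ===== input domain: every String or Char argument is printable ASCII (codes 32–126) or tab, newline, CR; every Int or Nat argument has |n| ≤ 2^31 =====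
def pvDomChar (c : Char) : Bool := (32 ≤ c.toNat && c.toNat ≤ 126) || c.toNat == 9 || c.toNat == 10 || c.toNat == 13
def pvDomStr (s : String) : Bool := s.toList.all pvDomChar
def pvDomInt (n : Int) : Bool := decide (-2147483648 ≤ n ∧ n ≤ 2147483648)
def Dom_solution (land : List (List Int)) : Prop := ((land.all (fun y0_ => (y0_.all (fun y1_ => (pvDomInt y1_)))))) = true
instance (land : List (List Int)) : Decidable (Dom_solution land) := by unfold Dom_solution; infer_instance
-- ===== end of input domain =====

-- B replaces A's four sliced-out max scans per row by one scan computing (max, its first index, second max); same return value.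

-- ===== PORT A =====
-- one dp-update of A: for col in range(4): temp[col] = max(dp[:col] + dp[col+1:]) + row[col]
def rowA (dp row : List Int) : List Int :=
  (PySem.List.pyRange 0 4 1).foldl
    (fun temp col =>
      PySem.List.pySetD temp col
        ((PySem.List.max? (PySem.List.slice dp none (some col) ++ PySem.List.slice dp (some (col + 1)) none)
            (fun x => x)).getD 0
          + PySem.List.pyGetD row col 0))
    [0, 0, 0, 0]

def solution (land : List (List Int)) : Int :=
  let dp0 := PySem.List.pyGetD land 0 []
  let dp := (PySem.List.pyRange 1 (land.length : Int) 1).foldl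
      (fun dp rowi => rowA dp (PySem.List.pyGetD land rowi [])) dp0
  (PySem.List.max? dp (fun x => x)).getD 0

-- ===== PORT B =====
-- one step of B's single scan: state (m1, i1, m2, j)
def altStep (st : Int × Int × Int × Int) (v : Int) : Int × Int × Int × Int :=
  match st with
  | (m1, i1, m2, j) =>
    if m1 < v then (v, j, m1, j + 1)
    else if m2 < v then (m1, i1, v, j + 1)
    else (m1, i1, m2, j + 1)

-- one dp-update of B: single scan for (max, first index of max, second max), then build the row
def rowB (dp row : List Int) : List Int :=
  let a := PySem.List.pyGetD dp 0 0
  let b := PySem.List.pyGetD dp 1 0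
  let init : Int × Int × Int × Int := if b ≤ a then (a, 0, b, 2) else (b, 1, a, 2)
  let r := (PySem.List.slice dp (some 2) none).foldl altStep init
  (PySem.List.pyRange 0 4 1).map
    (fun c => (if c = r.2.1 then r.2.2.1 else r.1) + PySem.List.pyGetD row c 0)

def solution_alt (land : List (List Int)) : Int :=
  let dp0 := PySem.List.pyGetD land 0 []
  let dp := (PySem.List.slice land (some 1) none).foldl rowB dp0
  (PySem.List.max? dp (fun x => x)).getD 0

-- ===== PRECONDITION & SPEC =====
-- Pre_ excludes exactly the inputs where the Python A raises: empty land (land[0]),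
-- a lone first row that is empty (max of an empty sequence), and, when there is more than one
-- row, a first row shorter than 2 (max of an empty slice) or a later row shorter than 4 (land[row][col]).
def Pre_solution (land : List (List Int)) : Prop :=
  land ≠ [] ∧ (land.length = 1 → land.headD [] ≠ []) ∧
    (1 < land.length → 2 ≤ (land.headD []).length ∧ ∀ r ∈ land.drop 1, 4 ≤ r.length)
instance (land : List (List Int)) : Decidable (Pre_solution land) := by unfold Pre_solution; infer_instance

def pvWitness_solution : List (List Int) := [[1, 2, 3, 5], [5, 6, 7, 8], [4, 3, 2, 1]]

def Spec_solution (land : List (List Int)) (out : Int) : Prop := out = solution_alt land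
instance (land : List (List Int)) (out : Int) : Decidable (Spec_solution land out) := by unfold Spec_solution; infer_instance

-- ===== CLAIM (what is proved, stated in full; the proofs are below) =====
def Claim_equal_solution : Prop := ∀ (land : List (List Int)), Dom_solution land → Pre_solution land → Spec_solution land (solution land)

-- ===== LEMMAS AND PROOFS =====

-- invariant of B's scan over the processed prefix p: m1 is the maximum, i1 its first index
-- (any index of the maximum suffices for the value claim), m2 the maximum with that occurrence removed
def Good (p : List Int) (m1 i1 m2 : Int) : Prop :=
  ∃ k : Nat, i1 = (k : Int) ∧ k < p.length ∧ p.getD k 0 = m1 ∧ (∀ x ∈ p, x ≤ m1) ∧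
    m2 ∈ p.eraseIdx k ∧ (∀ x ∈ p.eraseIdx k, x ≤ m2)

theorem max?_id_eq_some (l : List Int) (m : Int) (hm : m ∈ l) (hb : ∀ x ∈ l, x ≤ m) :
    PySem.List.max? l (fun x => x) = some m := by
  cases hx : PySem.List.max? l (fun x => x) with
  | none =>
      rw [PySem.List.max?_eq_none_iff] at hx
      subst hx; cases hm
  | some m' =>
      have h1 := PySem.List.max?_mem hx
      have h2 := PySem.List.max?_isMax hx
      rw [le_antisymm (hb m' h1) (h2 m hm)]

theorem good_snoc_gt (p : List Int) (v m1 i1 m2 : Int) (h : Good p m1 i1 m2) (hv : m1 < v) :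
    Good (p ++ [v]) v (p.length : Int) m1 := by
  obtain ⟨k, hik, hk, hget, hb, hm2, hm2b⟩ := h
  refine ⟨p.length, rfl, by simp, by simp, ?_, ?_, ?_⟩
  · intro x hx
    rcases List.mem_append.mp hx with hx | hx
    · exact le_of_lt (lt_of_le_of_lt (hb x hx) hv)
    · simp at hx; omega
  · rw [List.eraseIdx_append_of_length_le (le_refl _)]
    simp only [Nat.sub_self, List.eraseIdx_zero, List.tail_cons, List.append_nil]
    exact hget ▸ (List.getD_eq_getElem p 0 hk ▸ List.getElem_mem hk)
  · rw [List.eraseIdx_append_of_length_le (le_refl _)]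
    simpa using hb

theorem good_snoc_le (p : List Int) (v m1 i1 m2 : Int) (h : Good p m1 i1 m2) (hv : v ≤ m1) :
    Good (p ++ [v]) m1 i1 (if m2 < v then v else m2) := by
  obtain ⟨k, hik, hk, hget, hb, hm2, hm2b⟩ := h
  refine ⟨k, hik, by simp; omega, ?_, ?_, ?_, ?_⟩
  · rw [List.getD_eq_getElem _ _ (by simp; omega), List.getElem_append_left hk,
      ← List.getD_eq_getElem p 0 hk, hget]
  · intro x hx
    rcases List.mem_append.mp hx with hx | hx
    · exact hb x hx
    · simp at hx; omega
  · rw [List.eraseIdx_append_of_lt_length hk]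
    split_ifs
    · simp
    · exact List.mem_append_left _ hm2
  · rw [List.eraseIdx_append_of_lt_length hk]
    intro x hx
    rcases List.mem_append.mp hx with hx | hx
    · have := hm2b x hx; split_ifs <;> omega
    · simp at hx; split_ifs <;> omega

theorem scan_good : ∀ (t p : List Int) (m1 i1 m2 : Int), Good p m1 i1 m2 →
    Good (p ++ t) (t.foldl altStep (m1, i1, m2, (p.length : Int))).1
      (t.foldl altStep (m1, i1, m2, (p.length : Int))).2.1
      (t.foldl altStep (m1, i1, m2, (p.length : Int))).2.2.1 := by
  intro t
  induction t with
  | nil => intro p m1 i1 m2 hg; simpa using hg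
  | cons v t ih =>
      intro p m1 i1 m2 hg
      have hlen : ((p ++ [v]).length : Int) = (p.length : Int) + 1 := by simp
      simp only [List.foldl_cons]
      by_cases h1 : m1 < v
      · have hstep : altStep (m1, i1, m2, (p.length : Int)) v
            = (v, (p.length : Int), m1, (p.length : Int) + 1) := by
          simp [altStep, h1]
        rw [hstep, ← hlen]
        have := ih (p ++ [v]) v (p.length : Int) m1 (good_snoc_gt p v m1 i1 m2 hg h1)
        simpa [List.append_assoc] using this
      · have hv : v ≤ m1 := le_of_not_gt h1
        have hstep : altStep (m1, i1, m2, (p.length : Int)) v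
            = (m1, i1, if m2 < v then v else m2, (p.length : Int) + 1) := by
          simp only [altStep, if_neg h1]
          split_ifs <;> rfl
        rw [hstep, ← hlen]
        have := ih (p ++ [v]) m1 i1 _ (good_snoc_le p v m1 i1 m2 hg hv)
        simpa [List.append_assoc] using this

theorem good_max_erase (dp : List Int) (m1 i1 m2 : Int) (h : Good dp m1 i1 m2) (c : Nat) :
    PySem.List.max? (dp.take c ++ dp.drop (c + 1)) (fun x => x)
      = some (if (c : Int) = i1 then m2 else m1) := by
  obtain ⟨k, hik, hk, hget, hb, hm2, hm2b⟩ := h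
  have hm1mem : m1 ∈ dp := hget ▸ (List.getD_eq_getElem dp 0 hk ▸ List.getElem_mem hk)
  by_cases hc : c < dp.length
  · rw [← List.eraseIdx_eq_take_drop_succ]
    by_cases hck : c = k
    · subst hck
      rw [if_pos (by omega), max?_id_eq_some _ m2 hm2 hm2b]
    · rw [if_neg (by omega)]
      refine max?_id_eq_some _ m1 ?_ ?_
      · exact List.mem_eraseIdx_iff_getElem.mpr
          ⟨k, hk, fun h => hck h.symm, by rw [← List.getD_eq_getElem dp 0 hk, hget]⟩
      · intro x hx
        exact hb x (List.eraseIdx_subset hx)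
  · rw [List.take_of_length_le (by omega), List.drop_eq_nil_of_le (by omega),
      List.append_nil, if_neg (by omega)]
    exact max?_id_eq_some dp m1 hm1mem hb

theorem good_pair_ge (a b : Int) (h : b ≤ a) : Good [a, b] a 0 b := by
  refine ⟨0, rfl, by simp, rfl, ?_, by simp, ?_⟩
  · intro x hx; simp at hx; rcases hx with rfl | rfl <;> omega
  · intro x hx; simp at hx; omega

theorem good_pair_lt (a b : Int) (h : a < b) : Good [a, b] b 1 a := by
  refine ⟨1, rfl, by simp, rfl, ?_, by simp, ?_⟩
  · intro x hx; simp at hx; rcases hx with rfl | rfl <;> omega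
  · intro x hx; simp at hx; omega

theorem rowEq_core (dp row : List Int) (m1 i1 m2 : Int) (hg : Good dp m1 i1 m2) :
    List.foldl
      (fun temp col =>
        PySem.List.pySetD temp col
          ((PySem.List.max?
                  (PySem.List.slice dp none (some col) ++ PySem.List.slice dp (some (col + 1)))
                  fun x => x).getD 0 + PySem.List.pyGetD row col 0))
      [0, 0, 0, 0] (PySem.List.pyRange 0 4) =
    List.map (fun c => (if c = i1 then m2 else m1) + PySem.List.pyGetD row c 0)
      (PySem.List.pyRange 0 4) := by
  have k0 := good_max_erase dp m1 i1 m2 hg 0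
  have k1 := good_max_erase dp m1 i1 m2 hg 1
  have k2 := good_max_erase dp m1 i1 m2 hg 2
  have k3 := good_max_erase dp m1 i1 m2 hg 3
  push_cast at k0 k1 k2 k3
  simp only [List.take_zero, List.nil_append, List.drop_one] at k0
  rw [show PySem.List.pyRange 0 4 = [0, 1, 2, 3] from by decide]
  simp only [List.foldl_cons, List.foldl_nil, List.map_cons, List.map_nil]
  simp [PySem.List.pySetD_of_nonneg, PySem.List.slice_to, PySem.List.slice_from, k0, k1, k2, k3]

theorem rowEq (dp row : List Int) (h2 : 2 ≤ dp.length) : rowA dp row = rowB dp row := by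
  obtain ⟨x, y, t, rfl⟩ : ∃ x y t, dp = x :: y :: t := by
    match dp, h2 with
    | x :: y :: t, _ => exact ⟨x, y, t, rfl⟩
  unfold rowA rowB
  simp only [PySem.List.pyGetD_ofNat',
    PySem.List.slice_from (x :: y :: t) (by norm_num : (0:Int) ≤ 2)]
  simp only [show (x :: y :: t).getD 0 0 = x from rfl, show (x :: y :: t).getD 1 0 = y from rfl,
    show List.drop (Int.toNat 2) (x :: y :: t) = t from rfl]
  have hg : ∀ (m1 i1 m2 : Int), Good [x, y] m1 i1 m2 →
      Good (x :: y :: t) (t.foldl altStep (m1, i1, m2, 2)).1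
        (t.foldl altStep (m1, i1, m2, 2)).2.1 (t.foldl altStep (m1, i1, m2, 2)).2.2.1 := by
    intro m1 i1 m2 hgood
    have := scan_good t [x, y] m1 i1 m2 hgood
    norm_num at this
    exact this
  by_cases hxy : y ≤ x
  · rw [if_pos hxy]
    exact rowEq_core (x :: y :: t) row _ _ _ (hg x 0 y (good_pair_ge x y hxy))
  · rw [if_neg hxy]
    exact rowEq_core (x :: y :: t) row _ _ _ (hg y 1 x (good_pair_lt x y (by omega)))

theorem rowB_length (dp row : List Int) : (rowB dp row).length = 4 := by
  simp [rowB]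

theorem fold_rows : ∀ (rows : List (List Int)) (dp : List Int), 2 ≤ dp.length →
    rows.foldl rowA dp = rows.foldl rowB dp := by
  intro rows
  induction rows with
  | nil => intro dp _; rfl
  | cons r rs ih =>
      intro dp h2
      simp only [List.foldl_cons, rowEq dp r h2]
      exact ih _ (by rw [rowB_length]; omega)

-- ===== VERDICT (by name: the statement is the Claim_ definition above) =====
theorem solution_spec : Claim_equal_solution := by
  intro land _ hpre
  unfold Spec_solution solution solution_alt
  rw [PySem.List.slice_from land (by norm_num : (0:Int) ≤ 1)]
  norm_num
  rw [PySem.List.foldl_pyRange_pyGetD' land [] rowA _ (by norm_num : (0:Int) ≤ 1)]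
  norm_num
  cases land with
  | nil => exact absurd rfl hpre.1
  | cons h t =>
      cases t with
      | nil => rfl
      | cons r rs =>
          have h2 : 2 ≤ h.length := (hpre.2.2 (by simp)).1
          rw [PySem.List.pyGetD_zero_cons]
          rw [show (h :: r :: rs).tail = r :: rs from rfl, fold_rows (r :: rs) h h2]
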